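-- pv_equiv track=rewrite | github.com/WhalesBob/AlgorithmSolving | 백준/Silver/18290. NM과 K （1）/NM과 K （1）.py | all_not_close
-- ===== SOURCE A (Python) =====
-- def is_close(point_1, point_2):
--     return abs(point_1[0] - point_2[0]) + abs(point_1[1] - point_2[1]) < 2
--
-- def all_not_close(element_list):
--     s = set()
--     for element in element_list:
--         for compare in s:
--             if is_close(element, compare):
--                 return False
--         s.add(element)
--     return True
-- ===== SOURCE B (Python) =====
-- def all_not_close(element_list):
--     seen = set()
--     for (x, y) in element_list:
--         if ((x, y) in seen or (x + 1, y) in seen or (x - 1, y) in seen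
--                 or (x, y + 1) in seen or (x, y - 1) in seen):
--             return False
--         seen.add((x, y))
--     return True
-- ===== Notes on version B (the rewrite author's own statement) =====
-- stated objective: faster
-- what changed: Replaces the inner scan over all previously seen points with O(1) hash-set membership tests of the point's five Manhattan-distance-<2 neighbor offsets.
import Mathlib
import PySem

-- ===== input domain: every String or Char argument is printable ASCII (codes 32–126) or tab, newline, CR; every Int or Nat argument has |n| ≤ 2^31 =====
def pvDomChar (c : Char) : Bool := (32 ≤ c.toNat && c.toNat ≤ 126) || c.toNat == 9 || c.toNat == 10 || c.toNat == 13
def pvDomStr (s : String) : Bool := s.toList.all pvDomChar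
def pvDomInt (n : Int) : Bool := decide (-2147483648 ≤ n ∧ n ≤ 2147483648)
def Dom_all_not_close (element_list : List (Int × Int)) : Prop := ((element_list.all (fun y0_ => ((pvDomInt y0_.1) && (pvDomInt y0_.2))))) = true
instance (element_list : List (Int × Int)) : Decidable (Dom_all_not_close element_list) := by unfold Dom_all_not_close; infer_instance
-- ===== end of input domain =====

-- B replaces A's quadratic inner scan over seen points with five O(1) hash-set
-- membership tests of the Manhattan-distance-<2 neighbor offsets (faster, asymptotic).


-- ===== PORT A =====
def is_close (point_1 point_2 : Int × Int) : Bool :=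
  (point_1.1 - point_2.1).natAbs + (point_1.2 - point_2.2).natAbs < 2

-- the loop over element_list; the inner 'for compare in s' is an order-independent any over the set
def allNotCloseLoop (s : PySem.Set (Int × Int)) : List (Int × Int) → Bool
  | [] => true
  | element :: rest =>
    if s.any (fun compare => is_close element compare) then false
    else allNotCloseLoop (PySem.Set.add s element) rest

def all_not_close (element_list : List (Int × Int)) : Bool :=
  allNotCloseLoop PySem.Set.empty element_list

-- ===== PORT B =====
def altLoop (seen : PySem.Set (Int × Int)) : List (Int × Int) → Bool
  | [] => true
  | (x, y) :: rest =>
    if PySem.Set.contains seen (x, y) || PySem.Set.contains seen (x + 1, y)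
        || PySem.Set.contains seen (x - 1, y) || PySem.Set.contains seen (x, y + 1)
        || PySem.Set.contains seen (x, y - 1) then false
    else altLoop (PySem.Set.add seen (x, y)) rest

def all_not_close_alt (element_list : List (Int × Int)) : Bool :=
  altLoop PySem.Set.empty element_list

-- ===== PRECONDITION & SPEC =====
def Spec_all_not_close (element_list : List (Int × Int)) (out : Bool) : Prop := out = all_not_close_alt element_list
instance (element_list : List (Int × Int)) (out : Bool) : Decidable (Spec_all_not_close element_list out) := by unfold Spec_all_not_close; infer_instance

-- ===== CLAIM (what is proved, stated in full; the proofs are below) =====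
def Claim_equal_all_not_close : Prop := ∀ (element_list : List (Int × Int)), Dom_all_not_close element_list → Spec_all_not_close element_list (all_not_close element_list)

-- ===== LEMMAS AND PROOFS =====

-- a point is close (< 2 in Manhattan distance) iff it is one of the five neighbor offsets
theorem is_close_iff (e c : Int × Int) :
    is_close e c = true ↔
      c = e ∨ c = (e.1 + 1, e.2) ∨ c = (e.1 - 1, e.2) ∨ c = (e.1, e.2 + 1) ∨ c = (e.1, e.2 - 1) := by
  rcases e with ⟨x, y⟩; rcases c with ⟨a, b⟩
  simp [is_close, Prod.ext_iff]
  omega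

theorem any_close_eq (s : PySem.Set (Int × Int)) (x y : Int) :
    s.any (fun compare => is_close (x, y) compare)
      = (PySem.Set.contains s (x, y) || PySem.Set.contains s (x + 1, y)
          || PySem.Set.contains s (x - 1, y) || PySem.Set.contains s (x, y + 1)
          || PySem.Set.contains s (x, y - 1)) := by
  simp only [List.any_eq, PySem.Set.contains, List.contains_eq_mem, ← Bool.decide_or,
    decide_eq_decide]
  constructor
  · rintro ⟨c, hc, hcl⟩
    rcases (is_close_iff (x, y) c).mp hcl with h | h | h | h | h <;> subst h <;> simp_all
  · intro h
    rcases h with ((((h | h) | h) | h) | h) <;>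
      exact ⟨_, h, (is_close_iff _ _).mpr (by simp)⟩

theorem loop_eq (l : List (Int × Int)) (s : PySem.Set (Int × Int)) :
    allNotCloseLoop s l = altLoop s l := by
  induction l generalizing s with
  | nil => rfl
  | cons e rest ih =>
    rcases e with ⟨x, y⟩
    simp only [allNotCloseLoop, altLoop, any_close_eq]
    split <;> simp [ih]

-- ===== VERDICT (by name: the statement is the Claim_ definition above) =====
theorem all_not_close_spec : Claim_equal_all_not_close := by
  intro l _
  unfold Spec_all_not_close all_not_close all_not_close_alt
  exact loop_eq l _
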